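-- pv_equiv track=rewrite | github.com/kaolevat/core.planner | evolution.py | _population_full_comparison_similarities
-- ===== SOURCE A (Python) =====
-- def _population_full_comparison_similarities(population):
--     comparison_similarities_counter = []
--     total_population_similarities_counter = 0
--     population_size = len(population)
--     sum_of_similarities = 0
--     number_of_similarity_groups = 0
--     for index in range(0, population_size - 1):
--         for index2 in range(index + 1, population_size):
--             if population[index] == population[index2]:
--                 if len(comparison_similarities_counter) == 0:
--                     comparison_similarities_counter.append([1, population[index]])
--                 else:
--                     new_flag = True
--                     for index3 in range(len(comparison_similarities_counter)):
--                         if comparison_similarities_counter[index3][1] == population[index]: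
--                             comparison_similarities_counter[index3][0] += 1
--                             new_flag = False
--                             break
--                     if new_flag:
--                         comparison_similarities_counter.append([1, population[index]])
--     if not comparison_similarities_counter == []:
--         for index in range(len(comparison_similarities_counter)):
--             sum_of_similarities += comparison_similarities_counter[index][0]
--         number_of_similarity_groups = len(comparison_similarities_counter)
--     return (sum_of_similarities, number_of_similarity_groups)
-- ===== SOURCE B (Python) =====
-- def _population_full_comparison_similarities(population):
--     counts = {}
--     for value in population:
--         counts[value] = counts.get(value, 0) + 1
--     sum_of_similarities = 0
--     number_of_similarity_groups = 0
--     for m in counts.values():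
--         if m >= 2:
--             sum_of_similarities += m * (m - 1) // 2
--             number_of_similarity_groups += 1
--     return (sum_of_similarities, number_of_similarity_groups)
-- ===== Notes on version B (the rewrite author's own statement) =====
-- stated objective: faster
-- what changed: Replaces the O(n^2) all-pairs comparison with its inner linear scan of the group list by a single dict-counting pass, then computes each group's pair count as m*(m-1)//2 and counts groups with m>=2.
import Mathlib
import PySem

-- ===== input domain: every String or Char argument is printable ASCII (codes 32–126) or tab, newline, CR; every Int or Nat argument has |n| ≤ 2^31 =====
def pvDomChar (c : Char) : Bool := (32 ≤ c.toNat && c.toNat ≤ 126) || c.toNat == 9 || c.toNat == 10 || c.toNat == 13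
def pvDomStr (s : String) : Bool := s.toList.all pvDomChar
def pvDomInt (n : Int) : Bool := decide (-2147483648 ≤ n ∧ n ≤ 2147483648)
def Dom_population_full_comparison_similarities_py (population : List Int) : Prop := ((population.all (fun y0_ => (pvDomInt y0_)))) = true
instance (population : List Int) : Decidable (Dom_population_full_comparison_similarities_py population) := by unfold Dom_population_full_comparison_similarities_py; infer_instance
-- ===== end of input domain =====

-- B replaces A's all-pairs comparison (with its linear scan of the group list per equal pair)
-- by one dict-counting pass and the closed pair count m*(m-1)//2 per group; objective: faster.

-- ===== PORT A =====
-- the index3 loop over comparison_similarities_counter (increment the first entry holding this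
-- value and break, reporting new_flag); entries [count, value] are ported as pairs (count, value)
def pvScan (x : Int) : List (Int × Int) → List (Int × Int) × Bool
  | [] => ([], true)
  | (cnt, v) :: rest =>
    if v == x then ((cnt + 1, v) :: rest, false)
    else
      let r := pvScan x rest
      ((cnt, v) :: r.1, r.2)

def pvBump (x : Int) (c : List (Int × Int)) : List (Int × Int) :=
  if c.length == 0 then c ++ [(1, x)]
  else
    let r := pvScan x c
    if r.2 then r.1 ++ [(1, x)] else r.1


def population_full_comparison_similarities_py (population : List Int) : Int × Int :=
  let n : Int := (population.length : Int)
  let ctr : List (Int × Int) :=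
    (PySem.List.pyRange 0 (n - 1) 1).foldl (fun ctr i =>
      (PySem.List.pyRange (i + 1) n 1).foldl (fun ctr j =>
        if PySem.List.pyGetD population i 0 == PySem.List.pyGetD population j 0 then
          pvBump (PySem.List.pyGetD population i 0) ctr
        else ctr) ctr) []
  if ctr == [] then (0, 0)
  else (ctr.foldl (fun s p => s + p.1) 0, (ctr.length : Int))

-- ===== PORT B =====
def population_full_comparison_similarities_py_alt (population : List Int) : Int × Int :=
  let counts := population.foldl (fun d x => d.insert x (d.getD x 0 + 1)) (PySem.Dict.empty)
  counts.values.foldl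
    (fun (acc : Int × Int) m =>
      if 2 ≤ m then (acc.1 + PySem.Int.floordiv (m * (m - 1)) 2, acc.2 + 1) else acc)
    (0, 0)

-- ===== PRECONDITION & SPEC =====
def Spec_population_full_comparison_similarities_py (population : List Int) (out : Int × Int) : Prop := out = population_full_comparison_similarities_py_alt population
instance (population : List Int) (out : Int × Int) : Decidable (Spec_population_full_comparison_similarities_py population out) := by unfold Spec_population_full_comparison_similarities_py; infer_instance

-- ===== CLAIM (what is proved, stated in full; the proofs are below) =====
def Claim_equal_population_full_comparison_similarities_py : Prop := ∀ (population : List Int), Dom_population_full_comparison_similarities_py population → Spec_population_full_comparison_similarities_py population (population_full_comparison_similarities_py population)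

-- ===== LEMMAS AND PROOFS =====

-- proof-side view of A's counter list: its keys (the stored values) and the count stored at a key
def pvKeys (c : List (Int × Int)) : List Int := c.map (fun p => p.2)
def pvGet (c : List (Int × Int)) (v : Int) : Int :=
  ((c.find? (fun p => p.2 == v)).map (fun p => p.1)).getD 0

theorem pvKeys_cons (a u : Int) (tl : List (Int × Int)) :
    pvKeys ((a, u) :: tl) = u :: pvKeys tl := rfl

theorem pvGet_cons (a u : Int) (tl : List (Int × Int)) (v : Int) :
    pvGet ((a, u) :: tl) v = if u == v then a else pvGet tl v := by
  by_cases h : u = v <;> simp [pvGet, List.find?_cons, h]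

theorem pvGet_of_not_mem {c : List (Int × Int)} {x : Int} (h : x ∉ pvKeys c) :
    pvGet c x = 0 := by
  unfold pvGet
  have hf : c.find? (fun p => p.2 == x) = none := by
    rw [List.find?_eq_none]
    intro p hp
    simp only [beq_iff_eq]
    intro e
    exact h (by simpa [pvKeys, e] using List.mem_map_of_mem (l := c) (f := fun p => p.2) hp)
  rw [hf]; rfl

theorem pvScan_not_mem {c : List (Int × Int)} {x : Int} (h : x ∉ pvKeys c) :
    pvScan x c = (c, true) := by
  induction c with
  | nil => simp [pvScan]
  | cons hd tl ih =>
    obtain ⟨cnt, v⟩ := hd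
    rw [pvKeys_cons, List.mem_cons] at h
    push_neg at h
    simp [pvScan, Ne.symm h.1, ih h.2]

theorem pvScan_mem {c : List (Int × Int)} {x : Int} (h : x ∈ pvKeys c) :
    (pvScan x c).2 = false ∧ pvKeys (pvScan x c).1 = pvKeys c ∧
      pvGet (pvScan x c).1 x = pvGet c x + 1 ∧
      ∀ v, v ≠ x → pvGet (pvScan x c).1 v = pvGet c v := by
  induction c with
  | nil => simp [pvKeys] at h
  | cons hd tl ih =>
    obtain ⟨cnt, u⟩ := hd
    by_cases hu : u = x
    · subst hu
      refine ⟨by simp [pvScan], by simp [pvScan, pvKeys_cons], ?_, ?_⟩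
      · simp [pvScan, pvGet_cons]
      · intro v hv
        simp [pvScan, pvGet_cons, Ne.symm hv]
    · rw [pvKeys_cons, List.mem_cons] at h
      rcases h with h | h
      · exact absurd h.symm hu
      obtain ⟨h1, h2, h3, h4⟩ := ih h
      refine ⟨by simp [pvScan, hu, h1], ?_, ?_, ?_⟩
      · simp [pvScan, hu, pvKeys_cons, h2]
      · simpa [pvScan, hu, pvGet_cons, Ne.symm (fun e => hu e)] using h3
      · intro v hv
        by_cases huv : u = v
        · subst huv; simp [pvScan, hu, pvGet_cons]
        · simpa [pvScan, hu, pvGet_cons, huv] using h4 v hv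

theorem pvGet_append_new {c : List (Int × Int)} {x v : Int} (h : x ∉ pvKeys c) :
    pvGet (c ++ [(1, x)]) v = if x = v then pvGet c v + 1 else pvGet c v := by
  by_cases hv : x = v
  · subst hv
    have hf : c.find? (fun p => p.2 == x) = none := by
      rw [List.find?_eq_none]
      intro p hp
      simp only [beq_iff_eq]
      intro e
      exact h (by simpa [pvKeys, e] using List.mem_map_of_mem (l := c) (f := fun p => p.2) hp)
    simp [pvGet, List.find?_append, hf, pvGet_of_not_mem h]
  · simp only [pvGet, List.find?_append]
    cases hf : c.find? (fun p => p.2 == v) <;> simp [hf, hv]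

theorem pvBump_keys (x : Int) (c : List (Int × Int)) :
    pvKeys (pvBump x c) = if x ∈ pvKeys c then pvKeys c else pvKeys c ++ [x] := by
  unfold pvBump
  by_cases hm : x ∈ pvKeys c
  · have hne : c ≠ [] := by rintro rfl; simp [pvKeys] at hm
    obtain ⟨h1, h2, _, _⟩ := pvScan_mem hm
    simp [hne, List.length_eq_zero_iff, h1, h2, hm]
  · rw [pvScan_not_mem hm, if_neg hm]
    by_cases hc : c = [] <;> simp [hc, pvKeys, List.map_append]
theorem pvBump_get_self (x : Int) (c : List (Int × Int)) :
    pvGet (pvBump x c) x = pvGet c x + 1 := by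
  unfold pvBump
  by_cases hm : x ∈ pvKeys c
  · have hne : c ≠ [] := by rintro rfl; simp [pvKeys] at hm
    obtain ⟨h1, _, h3, _⟩ := pvScan_mem hm
    simp [hne, List.length_eq_zero_iff, h1, h3]
  · have e1 : pvGet (c ++ [(1, x)]) x = pvGet c x + 1 := by
      rw [pvGet_append_new hm]; simp
    rw [pvScan_not_mem hm]
    by_cases hc : c = []
    · subst hc; simpa using e1
    · simpa [hc, List.length_eq_zero_iff] using e1

theorem pvBump_get_ne {v x : Int} (h : v ≠ x) (c : List (Int × Int)) :
    pvGet (pvBump x c) v = pvGet c v := by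
  unfold pvBump
  by_cases hm : x ∈ pvKeys c
  · have hne : c ≠ [] := by rintro rfl; simp [pvKeys] at hm
    obtain ⟨h1, _, _, h4⟩ := pvScan_mem hm
    simp [hne, List.length_eq_zero_iff, h1, h4 v h]
  · have e1 : pvGet (c ++ [(1, x)]) v = pvGet c v := by
      rw [pvGet_append_new hm]; simp [Ne.symm h]
    rw [pvScan_not_mem hm]
    by_cases hc : c = []
    · subst hc; simpa using e1
    · simpa [hc, List.length_eq_zero_iff] using e1

def pvInner (x : Int) (ys : List Int) (c : List (Int × Int)) : List (Int × Int) :=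
  ys.foldl (fun c y => if x == y then pvBump x c else c) c

def pvALoop : List Int → List (Int × Int) → List (Int × Int)
  | [], c => c
  | x :: rest, c => pvALoop rest (pvInner x rest c)

def pvC2 : Nat → Int
  | 0 => 0
  | m + 1 => pvC2 m + m

theorem pvBump_mem (x v : Int) (c : List (Int × Int)) :
    v ∈ pvKeys (pvBump x c) ↔ v ∈ pvKeys c ∨ v = x := by
  rw [pvBump_keys]
  by_cases hm : x ∈ pvKeys c
  · simp only [if_pos hm]
    constructor
    · tauto
    · rintro (h | rfl) <;> [exact h; exact hm]
  · simp [if_neg hm]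

theorem pvBump_nodup (x : Int) (c : List (Int × Int)) (h : (pvKeys c).Nodup) :
    (pvKeys (pvBump x c)).Nodup := by
  rw [pvBump_keys]
  by_cases hm : x ∈ pvKeys c
  · simpa [if_pos hm] using h
  · rw [if_neg hm, List.nodup_append]
    exact ⟨h, by simp, by intro a ha b hb e; rw [List.mem_singleton] at hb; exact hm ((e.trans hb) ▸ ha)⟩

theorem pvInner_mem (x : Int) (ys : List Int) (c : List (Int × Int)) (v : Int) :
    v ∈ pvKeys (pvInner x ys c) ↔ v ∈ pvKeys c ∨ (v = x ∧ 0 < ys.count x) := by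
  induction ys generalizing c with
  | nil => simp [pvInner]
  | cons y t ih =>
    show v ∈ pvKeys (pvInner x t (if x == y then pvBump x c else c)) ↔ _
    rw [ih]
    by_cases hxy : x = y
    · subst hxy
      rw [if_pos (by simp), List.count_cons_self]
      rw [pvBump_mem]
      constructor
      · rintro ((h | rfl) | ⟨rfl, _⟩)
        · exact Or.inl h
        · exact Or.inr ⟨rfl, by omega⟩
        · exact Or.inr ⟨rfl, by omega⟩
      · rintro (h | ⟨rfl, _⟩)
        · exact Or.inl (Or.inl h)
        · exact Or.inl (Or.inr rfl)
    · rw [if_neg (by simp [hxy]), List.count_cons_of_ne (fun e => hxy e.symm)]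

theorem pvInner_nodup (x : Int) (ys : List Int) (c : List (Int × Int))
    (h : (pvKeys c).Nodup) : (pvKeys (pvInner x ys c)).Nodup := by
  induction ys generalizing c with
  | nil => simpa [pvInner]
  | cons y t ih =>
    show (pvKeys (pvInner x t (if x == y then pvBump x c else c))).Nodup
    by_cases hxy : x = y
    · exact ih _ (by simp [beq_iff_eq.mpr hxy, pvBump_nodup x c h])
    · simpa [show (x == y) = false by simp [hxy]] using ih c h

theorem pvInner_get_self (x : Int) (ys : List Int) (c : List (Int × Int)) :
    pvGet (pvInner x ys c) x = pvGet c x + ys.count x := by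
  induction ys generalizing c with
  | nil => simp [pvInner]
  | cons y t ih =>
    show pvGet (pvInner x t (if x == y then pvBump x c else c)) x = _
    rw [ih, List.count_cons]
    by_cases hxy : x = y
    · simp [pvBump_get_self, hxy]
      ring
    · have h1 : (x == y) = false := by simp [hxy]
      have h2 : (y == x) = false := by simp [Ne.symm hxy]
      simp [h1, h2]

theorem pvInner_get_ne {v x : Int} (h : v ≠ x) (ys : List Int) (c : List (Int × Int)) :
    pvGet (pvInner x ys c) v = pvGet c v := by
  induction ys generalizing c with
  | nil => simp [pvInner]
  | cons y t ih =>
    show pvGet (pvInner x t (if x == y then pvBump x c else c)) v = _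
    rw [ih]
    by_cases hxy : x = y
    · simp [beq_iff_eq.mpr hxy, pvBump_get_ne h]
    · simp [show (x == y) = false by simp [hxy]]

theorem pvALoop_mem (l : List Int) (c : List (Int × Int)) (v : Int) :
    v ∈ pvKeys (pvALoop l c) ↔ v ∈ pvKeys c ∨ 2 ≤ l.count v := by
  induction l generalizing c with
  | nil => simp [pvALoop]
  | cons x rest ih =>
    show v ∈ pvKeys (pvALoop rest (pvInner x rest c)) ↔ _
    rw [ih, pvInner_mem]
    by_cases hvx : v = x
    · subst hvx
      rw [List.count_cons_self]
      constructor
      · rintro ((h | ⟨_, hc⟩) | h)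
        · exact Or.inl h
        · exact Or.inr (by omega)
        · exact Or.inr (by omega)
      · rintro (h | h)
        · exact Or.inl (Or.inl h)
        · by_cases h2 : 2 ≤ rest.count v
          · exact Or.inr h2
          · exact Or.inl (Or.inr ⟨rfl, by omega⟩)
    · rw [List.count_cons_of_ne (Ne.symm hvx)]
      tauto

theorem pvALoop_nodup (l : List Int) (c : List (Int × Int)) (h : (pvKeys c).Nodup) :
    (pvKeys (pvALoop l c)).Nodup := by
  induction l generalizing c with
  | nil => simpa [pvALoop]
  | cons x rest ih => exact ih _ (pvInner_nodup x rest c h)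

theorem pvALoop_get (l : List Int) (c : List (Int × Int)) (v : Int) :
    pvGet (pvALoop l c) v = pvGet c v + pvC2 (l.count v) := by
  induction l generalizing c with
  | nil => simp [pvALoop, pvC2]
  | cons x rest ih =>
    show pvGet (pvALoop rest (pvInner x rest c)) v = _
    rw [ih]
    by_cases hvx : v = x
    · subst hvx
      rw [pvInner_get_self, List.count_cons_self]
      show pvGet c v + ↑(List.count v rest) + pvC2 (List.count v rest) =
        pvGet c v + (pvC2 (List.count v rest) + ↑(List.count v rest))
      ring
    · rw [pvInner_get_ne hvx, List.count_cons_of_ne (Ne.symm hvx)]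

theorem pvOuterBridge (l : List Int) :
    ∀ (m k : Nat) (c : List (Int × Int)), l.length ≤ k + m →
    (PySem.List.pyRange (k : Int) ((l.length : Int) - 1) 1).foldl (fun ctr i =>
      (PySem.List.pyRange (i + 1) (l.length : Int) 1).foldl (fun ctr j =>
        if PySem.List.pyGetD l i 0 == PySem.List.pyGetD l j 0 then
          pvBump (PySem.List.pyGetD l i 0) ctr
        else ctr) ctr) c = pvALoop (l.drop k) c := by
  intro m
  induction m with
  | zero =>
    intro k c hk
    rw [PySem.List.pyRange_one_eq_nil (by omega)]
    rw [List.drop_eq_nil_of_le (by omega)]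
    rfl
  | succ m ih =>
    intro k c hk
    by_cases hlt : k + 1 < l.length
    · rw [PySem.List.pyRange_one_cons (by omega)]
      rw [List.foldl_cons]
      have hcast : (k : Int) + 1 = ((k + 1 : Nat) : Int) := by omega
      rw [hcast]
      rw [PySem.List.foldl_pyRange_pyGetD' l 0
        (fun ctr y => if PySem.List.pyGetD l (k : Int) 0 == y then
          pvBump (PySem.List.pyGetD l (k : Int) 0) ctr else ctr) c (by positivity)]
      have hkl : k < l.length := by omega
      have hget : PySem.List.pyGetD l (k : Int) 0 = l[k] := by
        rw [PySem.List.pyGetD_natCast, List.getD_eq_getElem l 0 hkl]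
      have hdrop : l.drop k = l[k] :: l.drop (k + 1) := List.drop_eq_getElem_cons hkl
      rw [show ((k + 1 : Nat) : Int).toNat = k + 1 by omega]
      rw [ih (k + 1) _ (by omega), hdrop]
      show pvALoop (l.drop (k + 1)) _ = pvALoop (l.drop (k + 1)) (pvInner l[k] (l.drop (k + 1)) c)
      rw [hget]
      rfl
    · rw [PySem.List.pyRange_one_eq_nil (by omega)]
      have hlen : (l.drop k).length ≤ 1 := by
        rw [List.length_drop]; omega
      match hd : l.drop k with
      | [] => rfl
      | [y] => show c = pvALoop [] (pvInner y [] c); rfl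
      | y :: z :: t => rw [hd] at hlen; simp at hlen

theorem pvSum_keys (c : List (Int × Int)) (h : (pvKeys c).Nodup) :
    ((pvKeys c).map (pvGet c)).sum = (c.map (fun p => p.1)).sum := by
  induction c with
  | nil => simp [pvKeys]
  | cons hd tl ih =>
    obtain ⟨a, u⟩ := hd
    rw [pvKeys_cons] at h
    have hu : u ∉ pvKeys tl := (List.nodup_cons.mp h).1
    rw [pvKeys_cons, List.map_cons, List.map_cons, List.sum_cons, List.sum_cons]
    rw [pvGet_cons]; simp only [BEq.rfl, if_true]
    congr 1
    rw [← ih (List.nodup_cons.mp h).2]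
    apply congrArg
    apply List.map_congr_left
    intro k hk
    rw [pvGet_cons, if_neg (by simp; intro e; exact hu (e ▸ hk))]

theorem pvC2_le_one {m : Nat} (h : m ≤ 1) : pvC2 m = 0 := by
  interval_cases m <;> rfl

theorem pvC2_two_mul (m : Nat) : 2 * pvC2 m = (m : Int) * ((m : Int) - 1) := by
  induction m with
  | zero => rfl
  | succ m ih =>
    show 2 * (pvC2 m + (m : Int)) = _
    rw [mul_add, ih]
    push_cast
    ring

theorem pvC2_floordiv (m : Nat) :
    PySem.Int.floordiv ((m : Int) * ((m : Int) - 1)) 2 = pvC2 m := by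
  have h := pvC2_two_mul m
  exact (PySem.Int.floordiv_eq_iff_of_pos (by norm_num)).mpr ⟨by omega, by omega⟩

theorem pvBFold (ms : List Int) : ∀ (s g : Int),
    ms.foldl (fun (acc : Int × Int) m =>
      if 2 ≤ m then (acc.1 + PySem.Int.floordiv (m * (m - 1)) 2, acc.2 + 1) else acc) (s, g)
    = (s + (ms.map (fun m => if 2 ≤ m then PySem.Int.floordiv (m * (m - 1)) 2 else 0)).sum,
       g + (ms.countP (fun m => decide (2 ≤ m)) : Int)) := by
  induction ms with
  | nil => intro s g; simp
  | cons m t ih =>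
    intro s g
    rw [List.foldl_cons, List.map_cons, List.sum_cons, List.countP_cons]
    by_cases hm : 2 ≤ m
    · rw [if_pos hm, ih]
      simp [hm]
      constructor <;> push_cast <;> ring
    · rw [if_neg hm, ih]
      simp [hm]
theorem pvMain (l : List Int) :
    population_full_comparison_similarities_py l = population_full_comparison_similarities_py_alt l := by
  have hbridge := pvOuterBridge l l.length 0 [] (by omega)
  simp only [Nat.cast_zero, List.drop_zero] at hbridge
  set ctr := pvALoop l [] with hctr
  set K := pvKeys ctr with hK
  have hnd : K.Nodup := pvALoop_nodup l [] (by simp [pvKeys])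
  have hmem : ∀ v, v ∈ K ↔ 2 ≤ List.count v l := by
    intro v
    rw [hK, hctr, pvALoop_mem]
    simp [pvKeys]
  have hget : ∀ v, pvGet ctr v = pvC2 (List.count v l) := by
    intro v
    rw [hctr, pvALoop_get]
    show (0 : Int) + _ = _
    rw [zero_add]
  -- A's value
  have hA : population_full_comparison_similarities_py l
      = ((K.map (fun v => pvC2 (List.count v l))).sum, (K.length : Int)) := by
    unfold population_full_comparison_similarities_py
    simp only []
    rw [hbridge]
    by_cases hc : ctr = []
    · rw [if_pos (by simp [hc])]
      rw [hc] at hK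
      simp [hK, pvKeys]
    · rw [if_neg (by simp [hc])]
      rw [PySem.List.foldl_add ctr (fun p => p.1) 0, zero_add]
      rw [← pvSum_keys ctr hnd, ← hK]
      rw [List.map_congr_left (fun v _ => hget v)]
      simp [hK, pvKeys]
  -- B's value
  have hB : population_full_comparison_similarities_py_alt l
      = (((PySem.Set.ofList l).map (fun v => pvC2 (List.count v l))).sum,
         (((PySem.Set.ofList l).countP (fun v => decide (2 ≤ List.count v l))) : Int)) := by
    unfold population_full_comparison_similarities_py_alt
    simp only []
    rw [PySem.Dict.foldl_insert_getD_add_one_eq_counter]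
    rw [PySem.Dict.values_eq_map_keys _ (PySem.Dict.nodup_keys_counter l) 0]
    simp only [PySem.Dict.keys_counter, PySem.Dict.getD_counter]
    rw [pvBFold]
    simp only [zero_add, List.map_map, List.countP_map]
    rw [Prod.mk.injEq]
    refine ⟨?_, ?_⟩
    · apply congrArg List.sum
      apply List.map_congr_left
      intro v _
      show (if (2 : Int) ≤ ((List.count v l : Nat) : Int) then
        PySem.Int.floordiv (((List.count v l : Nat) : Int) * (((List.count v l : Nat) : Int) - 1)) 2 else 0)
        = pvC2 (List.count v l)
      by_cases h2 : 2 ≤ List.count v l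
      · rw [if_pos (by exact_mod_cast h2), pvC2_floordiv]
      · rw [if_neg (by exact_mod_cast h2), pvC2_le_one (by omega)]
    · apply congrArg Int.ofNat
      apply List.countP_congr
      intro v _
      simp only [Function.comp_apply, decide_eq_true_eq]
      exact_mod_cast Iff.rfl
  -- assemble
  rw [hA, hB, Prod.mk.injEq]
  have hS : (PySem.Set.ofList l).Nodup := PySem.Set.nodup_ofList l
  set S := PySem.Set.ofList l with hSdef
  have hKS : K.toFinset ⊆ S.toFinset := by
    intro v hv
    rw [List.mem_toFinset] at *
    rw [hSdef, PySem.Set.mem_ofList]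
    have := (hmem v).mp hv
    exact List.count_pos_iff.mp (by omega)
  refine ⟨?_, ?_⟩
  · rw [← List.sum_toFinset _ hnd, ← List.sum_toFinset _ hS]
    exact Finset.sum_subset hKS (fun v _ hvK => pvC2_le_one (by
      have h2 : ¬ 2 ≤ List.count v l := fun h => hvK (List.mem_toFinset.mpr ((hmem v).mpr h))
      omega))
  · have hp : K.length = (S.filter (fun v => decide (2 ≤ List.count v l))).length := by
      rw [← List.toFinset_card_of_nodup hnd, ← List.toFinset_card_of_nodup (hS.filter _)]
      congr 1
      ext v
      simp only [List.mem_toFinset, List.mem_filter, decide_eq_true_eq]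
      constructor
      · intro hv
        refine ⟨?_, (hmem v).mp hv⟩
        have h2 := (hmem v).mp hv
        rw [hSdef, PySem.Set.mem_ofList]
        exact List.count_pos_iff.mp (by omega)
      · rintro ⟨_, h2⟩
        exact (hmem v).mpr h2
    rw [List.countP_eq_length_filter, hp]

-- ===== VERDICT (by name: the statement is the Claim_ definition above) =====
theorem population_full_comparison_similarities_py_spec : Claim_equal_population_full_comparison_similarities_py := by
  intro population _
  unfold Spec_population_full_comparison_similarities_py
  exact pvMain population
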